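-- pv_equiv track=rewrite | github.com/joerleigh/AdventOfCode2024 | 2025/day_3.py | first_max_digit
-- ===== SOURCE A (Python) =====
-- def first_max_digit(line, start, end):
--     max_digit = "0"
--     max_digit_index = -1
--     for digit_index in range(start, end):
--         if(line[digit_index] > max_digit):
--             max_digit = line[digit_index]
--             max_digit_index = digit_index
--     return (max_digit, max_digit_index)
-- ===== SOURCE B (Python) =====
-- def first_max_digit(line, start, end):
--     # Two-pass decomposition: gather the window's chars (index-based, like A),
--     # take the max, then locate its first occurrence.
--     chars = [line[i] for i in range(start, end)]
--     if not chars: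
--         return ("0", -1)
--     m = max(chars)
--     if m <= "0":
--         return ("0", -1)
--     return (m, start + chars.index(m))
-- ===== Notes on version B (the rewrite author's own statement) =====
-- stated objective: simpler
-- what changed: Replaced the single-pass running-(max,index) fold with a two-pass decomposition: collect the window's characters once, take max(), then find its first index; the '0'/-1 sentinel falls out of an empty-or-all-≤'0' check.
import Mathlib
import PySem

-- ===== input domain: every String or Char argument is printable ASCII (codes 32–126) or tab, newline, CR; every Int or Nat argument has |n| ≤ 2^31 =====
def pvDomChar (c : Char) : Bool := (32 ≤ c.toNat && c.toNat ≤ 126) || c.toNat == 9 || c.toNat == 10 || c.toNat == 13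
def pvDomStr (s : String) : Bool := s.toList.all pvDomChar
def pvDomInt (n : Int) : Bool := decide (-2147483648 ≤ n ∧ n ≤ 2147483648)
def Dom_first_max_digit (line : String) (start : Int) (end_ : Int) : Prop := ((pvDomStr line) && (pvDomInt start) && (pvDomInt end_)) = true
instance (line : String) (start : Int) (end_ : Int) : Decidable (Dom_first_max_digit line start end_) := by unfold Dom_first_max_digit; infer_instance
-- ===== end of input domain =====

-- B replaces A's single-pass running-(max,index) fold by a two-pass decomposition
-- (collect window chars, take max, then find its first index) — objective: simpler.

-- ===== PORT A =====
-- single-char Python strings are ported as Char (Python's string "<" on length-1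
-- strings is code-point comparison, = Char "<"); the final pair re-wraps the Char
def first_max_digit (line : String) (start : Int) (end_ : Int) : String × Int :=
  let r := (PySem.List.pyRange start end_ 1).foldl
    (fun st i =>
      match PySem.Str.pyGet? line i with
      | some c => if st.1 < c then (c, i) else st
      | none => st)  -- none = IndexError in Python; such inputs are excluded by Pre_
    ('0', -1)
  (String.ofList [r.1], r.2)

-- ===== PORT B =====
def first_max_digit_alt (line : String) (start : Int) (end_ : Int) : String × Int :=
  -- chars = [line[i] for i in range(start, end)]  (a raising index is excluded by Pre_)
  let chars := (PySem.List.pyRange start end_ 1).filterMap (PySem.Str.pyGet? line)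
  match chars with
  | [] => ("0", -1)
  | c :: cs =>
    let m := cs.foldl max c           -- max(chars)
    if m ≤ '0' then ("0", -1)
    else (String.ofList [m], start + (((PySem.List.index? chars m).getD 0 : Nat) : Int))

-- ===== PRECONDITION & SPEC =====
-- Pre_ excludes exactly the inputs where line[i] raises IndexError for some i in
-- range(start, end) (both A and B raise there).
def Pre_first_max_digit (line : String) (start : Int) (end_ : Int) : Prop :=
  start < end_ → (-(line.toList.length : Int) ≤ start ∧ end_ ≤ (line.toList.length : Int))
instance (line : String) (start : Int) (end_ : Int) : Decidable (Pre_first_max_digit line start end_) := by unfold Pre_first_max_digit; infer_instance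

def pvWitness_first_max_digit : String × Int × Int := ("a3b95", 1, 4)

def Spec_first_max_digit (line : String) (start : Int) (end_ : Int) (out : String × Int) : Prop := out = first_max_digit_alt line start end_
instance (line : String) (start : Int) (end_ : Int) (out : String × Int) : Decidable (Spec_first_max_digit line start end_ out) := by unfold Spec_first_max_digit; infer_instance

-- ===== CLAIM (what is proved, stated in full; the proofs are below) =====
def Claim_equal_first_max_digit : Prop := ∀ (line : String) (start : Int) (end_ : Int), Dom_first_max_digit line start end_ → Pre_first_max_digit line start end_ → Spec_first_max_digit line start end_ (first_max_digit line start end_)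

-- ===== LEMMAS AND PROOFS =====

-- proof-side helpers (stated over an abstract lookup g to keep simp bridges out)
def pvPair (g : Int → Option Char) (i : Int) : Option (Int × Char) :=
  (g i).map (fun c => (i, c))

def pvStepA (st : Char × Int) (p : Int × Char) : Char × Int :=
  if st.1 < p.2 then (p.2, p.1) else st

def pvFirstIdx (c : Char) (d : Int) : List (Int × Char) → Int
  | [] => d
  | p :: ps => if p.2 = c then p.1 else pvFirstIdx c d ps

theorem pvFirstIdx_cons (c : Char) (d : Int) (p : Int × Char) (ps : List (Int × Char)) :
    pvFirstIdx c d (p :: ps) = if p.2 = c then p.1 else pvFirstIdx c d ps := rfl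

-- A's fold over the index list is the fold of pvStepA over the (index, char) pairs
theorem pvFoldMatch (g : Int → Option Char) :
    ∀ (l : List Int) (st : Char × Int),
      l.foldl (fun st i =>
        match g i with
        | some c => if st.1 < c then (c, i) else st
        | none => st) st
      = (l.filterMap (pvPair g)).foldl pvStepA st := by
  intro l
  induction l with
  | nil => intro st; rfl
  | cons i l ih =>
    intro st
    rw [List.foldl_cons, List.filterMap_cons]
    cases h : g i with
    | none => simp only [h, pvPair, Option.map_none]; exact ih st
    | some c =>
      simp only [h, pvPair, Option.map_some, List.foldl_cons]
      rw [ih]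
      rfl

theorem pvMapSndFilterMap (g : Int → Option Char) (l : List Int) :
    (l.filterMap (pvPair g)).map Prod.snd = l.filterMap g := by
  induction l with
  | nil => rfl
  | cons i l ih =>
    rw [List.filterMap_cons, List.filterMap_cons]
    cases h : g i with
    | none =>
      have hp : pvPair g i = none := by rw [pvPair, h]; rfl
      rw [hp, ih]
    | some c =>
      have hp : pvPair g i = some (i, c) := by rw [pvPair, h]; rfl
      rw [hp, List.map_cons, ih]

theorem pvFirstIdx_default (c : Char) (d d' : Int) :
    ∀ ps : List (Int × Char), c ∈ ps.map Prod.snd → pvFirstIdx c d ps = pvFirstIdx c d' ps := by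
  intro ps
  induction ps with
  | nil => intro h; simp at h
  | cons p ps ih =>
    intro h
    by_cases hc : p.2 = c
    · rw [pvFirstIdx_cons, pvFirstIdx_cons, if_pos hc, if_pos hc]
    · simp only [List.map_cons, List.mem_cons] at h
      rcases h with h | h
      · exact absurd h.symm hc
      · rw [pvFirstIdx_cons, pvFirstIdx_cons, if_neg hc, if_neg hc, ih h]

theorem pvFoldlMaxMax (a b : Char) :
    ∀ t : List Char, t.foldl max (max a b) = max a (t.foldl max b) := by
  intro t
  induction t generalizing b with
  | nil => rfl
  | cons c t ih => rw [List.foldl_cons, List.foldl_cons, max_assoc, ih]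

-- the core characterisation of A's fold
theorem pvFoldA_eq (ps : List (Int × Char)) :
    ∀ (m : Char) (j : Int),
      ps.foldl pvStepA (m, j)
      = ((ps.map Prod.snd).foldl max m,
         if (ps.map Prod.snd).foldl max m = m then j
         else pvFirstIdx ((ps.map Prod.snd).foldl max m) j ps) := by
  induction ps with
  | nil => intro m j; simp
  | cons p ps ih =>
    intro m j
    obtain ⟨i, c⟩ := p
    rw [List.foldl_cons, List.map_cons, List.foldl_cons]
    dsimp only
    have hstep : pvStepA (m, j) (i, c) = if m < c then (c, i) else (m, j) := rfl
    rw [hstep]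
    by_cases h : m < c
    · rw [if_pos h, ih c i]
      have hmc : max m c = c := max_eq_right h.le
      rw [hmc]
      have hcM : c ≤ (ps.map Prod.snd).foldl max c := (PySem.List.le_foldl_max (ps.map Prod.snd) c).1
      have hMne : (ps.map Prod.snd).foldl max c ≠ m := fun he => absurd (he ▸ hcM) (not_le.mpr h)
      rw [if_neg hMne]
      by_cases hMc : (ps.map Prod.snd).foldl max c = c
      · rw [if_pos hMc, hMc, pvFirstIdx_cons]
        dsimp only
        rw [if_pos rfl]
      · have hmem : (ps.map Prod.snd).foldl max c ∈ ps.map Prod.snd := by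
          rcases PySem.List.foldl_max_mem (ps.map Prod.snd) c with hh | hh
          · exact absurd hh hMc
          · exact hh
        rw [if_neg hMc, pvFirstIdx_cons]
        dsimp only
        rw [if_neg (fun he : c = (ps.map Prod.snd).foldl max c => hMc he.symm),
            pvFirstIdx_default _ i j ps hmem]
    · rw [if_neg h, ih m j]
      have hmc : max m c = m := max_eq_left (not_lt.mp h)
      rw [hmc]
      have hmM : m ≤ (ps.map Prod.snd).foldl max m := (PySem.List.le_foldl_max (ps.map Prod.snd) m).1
      by_cases hMm : (ps.map Prod.snd).foldl max m = m
      · rw [if_pos hMm, if_pos hMm]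
      · have hcM : c ≠ (ps.map Prod.snd).foldl max m := by
          intro he
          have h1 : (ps.map Prod.snd).foldl max m ≤ m := he ▸ (not_lt.mp h)
          exact hMm (le_antisymm h1 hmM)
        rw [if_neg hMm, if_neg hMm, pvFirstIdx_cons]
        dsimp only
        rw [if_neg hcM]

-- first index stored in the pairs = start + position in the char list
theorem pvFirstIdx_index (g : Int → Option Char) :
    ∀ (n : Nat) (start : Int) (c : Char),
      (∀ i ∈ PySem.List.pyRange start (start + n) 1, (g i).isSome) →
      c ∈ (PySem.List.pyRange start (start + n) 1).filterMap g →
      pvFirstIdx c (-1) ((PySem.List.pyRange start (start + n) 1).filterMap (pvPair g))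
        = start + (((PySem.List.index?
            ((PySem.List.pyRange start (start + n) 1).filterMap g) c).getD 0 : Nat) : Int) := by
  intro n
  induction n with
  | zero =>
    intro start c _ hmem
    rw [show start + ((0 : Nat) : Int) = start by simp,
        PySem.List.pyRange_one_eq_nil (le_refl start)] at hmem
    simp at hmem
  | succ n ih =>
    intro start c hsome hmem
    have hlt : start < start + (((n : Nat) + 1 : Nat) : Int) := by push_cast; omega
    have hr : PySem.List.pyRange start (start + (((n : Nat) + 1 : Nat) : Int)) 1
        = start :: PySem.List.pyRange (start + 1) (start + (((n : Nat) + 1 : Nat) : Int)) 1 :=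
      PySem.List.pyRange_one_cons hlt
    have hs0 : (g start).isSome := by
      apply hsome
      rw [hr]; exact List.mem_cons_self
    obtain ⟨a, ha⟩ := Option.isSome_iff_exists.mp hs0
    have hp : pvPair g start = some (start, a) := by rw [pvPair, ha]; rfl
    have htl : start + (((n : Nat) + 1 : Nat) : Int) = (start + 1) + ((n : Nat) : Int) := by push_cast; omega
    rw [hr] at hmem ⊢
    rw [List.filterMap_cons, ha] at hmem
    rw [List.filterMap_cons, List.filterMap_cons, hp, ha, pvFirstIdx_cons]
    dsimp only
    by_cases hac : a = c
    · subst hac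
      rw [if_pos rfl, PySem.List.index?_cons_self]
      simp
    · rw [if_neg hac]
      have hmem' : c ∈ (PySem.List.pyRange (start + 1) (start + (((n : Nat) + 1 : Nat) : Int)) 1).filterMap g := by
        rcases List.mem_cons.mp hmem with h | h
        · exact absurd h.symm hac
        · exact h
      have hsome' : ∀ i ∈ PySem.List.pyRange (start + 1) ((start + 1) + ((n : Nat) : Int)) 1, (g i).isSome := by
        intro i hi
        apply hsome
        rw [hr]
        rw [PySem.List.mem_pyRange_one] at hi
        rw [List.mem_cons, PySem.List.mem_pyRange_one]
        right; constructor <;> omega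
      rw [htl] at hmem' ⊢
      have hrec := ih (start + 1) c hsome' hmem'
      rw [hrec, PySem.List.index?_cons_of_ne _ hac]
      have hks : (PySem.List.index?
          ((PySem.List.pyRange (start + 1) ((start + 1) + ((n : Nat) : Int)) 1).filterMap g) c).isSome := by
        rw [PySem.List.index?_isSome_iff]; exact hmem'
      obtain ⟨k, hk⟩ := Option.isSome_iff_exists.mp hks
      rw [hk]
      simp only [Option.map_some, Option.getD_some]
      push_cast; omega

-- under Pre_, every index in the range is in bounds
theorem pvAllSome (line : String) (start end_ : Int)
    (hpre : Pre_first_max_digit line start end_) :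
    ∀ i ∈ PySem.List.pyRange start end_ 1, (PySem.Str.pyGet? line i).isSome := by
  intro i hi
  rw [PySem.List.mem_pyRange_one] at hi
  have hb := hpre (lt_of_le_of_lt hi.1 hi.2)
  rw [Option.isSome_iff_ne_none]
  intro hnone
  have hnr : ¬ PySem.Raise.InRange line.toList.length i := by
    rw [← PySem.List.pyGet?_eq_none_iff (xs := line.toList) (i := i)]
    simpa using hnone
  rw [PySem.Raise.InRange] at hnr
  omega

-- ===== VERDICT (by name: the statement is the Claim_ definition above) =====
theorem first_max_digit_spec : Claim_equal_first_max_digit := by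
  intro line start end_ _ hpre
  unfold Spec_first_max_digit first_max_digit first_max_digit_alt
  rw [pvFoldMatch (fun i => PySem.Str.pyGet? line i), pvFoldA_eq,
      pvMapSndFilterMap (fun i => PySem.Str.pyGet? line i)]
  cases hc : (PySem.List.pyRange start end_ 1).filterMap (fun i => PySem.Str.pyGet? line i) with
  | nil =>
    dsimp only
    rw [show List.foldl max '0' ([] : List Char) = '0' from rfl, if_pos rfl]
  | cons c cs =>
    dsimp only
    have hsplit : List.foldl max '0' (c :: cs) = max '0' (List.foldl max c cs) := by
      rw [List.foldl_cons, pvFoldlMaxMax]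
    by_cases hm : List.foldl max c cs ≤ '0'
    · have hMeq : List.foldl max '0' (c :: cs) = '0' := by
        rw [hsplit]; exact max_eq_left hm
      rw [hMeq, if_pos rfl, if_pos hm]
    · have hmax : List.foldl max '0' (c :: cs) = List.foldl max c cs := by
        rw [hsplit]; exact max_eq_right (le_of_not_ge hm)
      have hMne : List.foldl max '0' (c :: cs) ≠ '0' := by
        rw [hmax]; intro he; exact hm (le_of_eq he)
      rw [if_neg hMne, if_neg hm, hmax]
      refine Prod.ext rfl ?_
      dsimp only
      have hmem : List.foldl max c cs ∈ c :: cs := by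
        rcases PySem.List.foldl_max_mem cs c with h | h
        · rw [h]; exact List.mem_cons_self
        · exact List.mem_cons_of_mem c h
      have hse : start < end_ := by
        by_contra hge
        rw [PySem.List.pyRange_one_eq_nil (le_of_not_gt hge)] at hc
        simp at hc
      have hlen : end_ = start + (((end_ - start).toNat : Nat) : Int) := by omega
      rw [← hc, hlen]
      exact pvFirstIdx_index (fun i => PySem.Str.pyGet? line i) (end_ - start).toNat start _
        (by rw [← hlen]; exact pvAllSome line start end_ hpre)
        (by rw [← hlen, hc]; exact hmem)
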